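-- pv_equiv track=rewrite | github.com/JasonFarns/AdventOfCode | 2021/syntax-2.py | score_autocomplete_chars
-- ===== SOURCE A (Python) =====
-- def score_autocomplete_chars(char_list):
--     score = 0
--     for char in char_list:
--         if (char == ')'):
--             score = (score * 5) + 1
--         if (char == ']'):
--             score = (score * 5) + 2
--         if (char == '}'):
--             score = (score * 5) + 3
--         if (char == '>'):
--             score = (score * 5) + 4
--
--     return score
-- ===== SOURCE B (Python) =====
-- _VALUES = {')': 1, ']': 2, '}': 3, '>': 4}
--
-- def score_autocomplete_chars(char_list):
--     values = [_VALUES[c] for c in char_list if c in _VALUES]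
--     return sum(v * 5 ** i for i, v in enumerate(reversed(values)))
-- ===== Notes on version B (the rewrite author's own statement) =====
-- stated objective: alternative
-- what changed: Replaces the single-pass Horner accumulation with four repeated equality tests per char by a table lookup filtering pass followed by a positional base-5 weighted sum over the reversed value list.
import Mathlib
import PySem

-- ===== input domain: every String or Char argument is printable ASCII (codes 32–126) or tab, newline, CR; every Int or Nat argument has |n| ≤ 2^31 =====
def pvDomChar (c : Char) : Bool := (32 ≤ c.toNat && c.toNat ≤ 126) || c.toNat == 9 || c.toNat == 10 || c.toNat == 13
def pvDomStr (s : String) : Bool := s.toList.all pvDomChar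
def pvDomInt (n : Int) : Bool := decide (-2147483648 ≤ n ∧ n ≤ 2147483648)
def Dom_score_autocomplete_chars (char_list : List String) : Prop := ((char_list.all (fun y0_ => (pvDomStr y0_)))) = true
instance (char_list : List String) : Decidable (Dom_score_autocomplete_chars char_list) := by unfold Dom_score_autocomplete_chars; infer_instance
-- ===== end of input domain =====

-- B replaces A's single-pass Horner accumulation by a table-lookup filter plus a positional base-5 weighted sum (alternative decomposition, same cost).

-- ===== PORT A =====
def score_autocomplete_chars (char_list : List String) : Int :=
  char_list.foldl (fun score char =>
    let score := if char = ")" then score * 5 + 1 else score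
    let score := if char = "]" then score * 5 + 2 else score
    let score := if char = "}" then score * 5 + 3 else score
    if char = ">" then score * 5 + 4 else score) 0

-- ===== PORT B =====
-- _VALUES lookup: some v if the char is in the table, none otherwise
def pvVal? (c : String) : Option Int :=
  if c = ")" then some 1
  else if c = "]" then some 2
  else if c = "}" then some 3
  else if c = ">" then some 4
  else none

def score_autocomplete_chars_alt (char_list : List String) : Int :=
  let values := char_list.filterMap pvVal?
  ((PySem.List.enumerate values.reverse 0).map (fun p => p.2 * (5:Int) ^ p.1.toNat)).sum

-- ===== PRECONDITION & SPEC =====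
def Spec_score_autocomplete_chars (char_list : List String) (out : Int) : Prop := out = score_autocomplete_chars_alt char_list
instance (char_list : List String) (out : Int) : Decidable (Spec_score_autocomplete_chars char_list out) := by unfold Spec_score_autocomplete_chars; infer_instance

-- ===== CLAIM =====
def Claim_equal_score_autocomplete_chars : Prop := ∀ (char_list : List String), Dom_score_autocomplete_chars char_list → Spec_score_autocomplete_chars char_list (score_autocomplete_chars char_list)

-- ===== LEMMAS AND PROOFS =====

-- the positional base-5 sum B computes, as a function of the value list
def pvPosSum (vals : List Int) : Int :=
  ((PySem.List.enumerate vals.reverse 0).map (fun p => p.2 * (5:Int) ^ p.1.toNat)).sum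

lemma pvPosSum_cons (v : Int) (t : List Int) :
    pvPosSum (v :: t) = pvPosSum t + v * (5:Int) ^ t.length := by
  simp [pvPosSum, List.reverse_cons, PySem.List.enumerate_append,
        PySem.List.enumerate_cons, PySem.List.enumerate_nil]

-- A's fold equals the Horner fold over the filtered value list
lemma fold_eq_horner (l : List String) (acc : Int) :
    l.foldl (fun score char =>
      let score := if char = ")" then score * 5 + 1 else score
      let score := if char = "]" then score * 5 + 2 else score
      let score := if char = "}" then score * 5 + 3 else score
      if char = ">" then score * 5 + 4 else score) acc
    = (l.filterMap pvVal?).foldl (fun s v => s * 5 + v) acc := by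
  induction l generalizing acc with
  | nil => rfl
  | cons c t ih =>
    by_cases h1 : c = ")" <;> by_cases h2 : c = "]" <;> by_cases h3 : c = "}" <;>
      by_cases h4 : c = ">" <;> simp_all [pvVal?, List.foldl]

-- the Horner fold equals the positional sum (with the accumulator shifted)
lemma horner_eq_pos (vals : List Int) (acc : Int) :
    vals.foldl (fun s v => s * 5 + v) acc = acc * (5:Int) ^ vals.length + pvPosSum vals := by
  induction vals generalizing acc with
  | nil => simp [pvPosSum, PySem.List.enumerate_nil]
  | cons v t ih =>
    simp only [List.foldl, List.length_cons, pvPosSum_cons, ih]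
    ring

-- ===== VERDICT =====
theorem score_autocomplete_chars_spec : Claim_equal_score_autocomplete_chars := by
  intro l _
  show _ = _
  rw [score_autocomplete_chars, score_autocomplete_chars_alt, fold_eq_horner, horner_eq_pos]
  simp [pvPosSum]
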